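-- pv_equiv track=rewrite | github.com/sonyxperiadev/ave | workspace/src/ave/git.py | get_error_str
-- ===== SOURCE A (Python) =====
-- def get_error_str(output):
--     # parse output to an error message
--     fatal_lines = ''
--     lines = output.splitlines()
--     for l in lines:
--         if 'usage: git' in l:
--             return ': Wrong usage. ' + l
--         elif 'fatal: ' in l:
--             fatal_lines += ': %s' % l.replace('fatal: ', '')
--     if fatal_lines:
--         return fatal_lines
--     if lines:
--         return lines[-1]
--     return ': Unknown error'
-- ===== SOURCE B (Python) =====
-- def get_error_str(output):
--     # two-pass decomposition: usage scan first, then fatal-line join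
--     lines = output.splitlines()
--     usage = next((l for l in lines if 'usage: git' in l), None)
--     if usage is not None:
--         return ': Wrong usage. ' + usage
--     fatal = ''.join(': ' + l.replace('fatal: ', '') for l in lines if 'fatal: ' in l)
--     if fatal:
--         return fatal
--     return lines[-1] if lines else ': Unknown error'
-- ===== Notes on version B (the rewrite author's own statement) =====
-- stated objective: simpler
-- what changed: A's single interleaved loop with an accumulator and early return is replaced by two separate passes over the lines: a first scan for a usage line, then a filter-map-join building the fatal message, with the tail logic unchanged.
import Mathlib
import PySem

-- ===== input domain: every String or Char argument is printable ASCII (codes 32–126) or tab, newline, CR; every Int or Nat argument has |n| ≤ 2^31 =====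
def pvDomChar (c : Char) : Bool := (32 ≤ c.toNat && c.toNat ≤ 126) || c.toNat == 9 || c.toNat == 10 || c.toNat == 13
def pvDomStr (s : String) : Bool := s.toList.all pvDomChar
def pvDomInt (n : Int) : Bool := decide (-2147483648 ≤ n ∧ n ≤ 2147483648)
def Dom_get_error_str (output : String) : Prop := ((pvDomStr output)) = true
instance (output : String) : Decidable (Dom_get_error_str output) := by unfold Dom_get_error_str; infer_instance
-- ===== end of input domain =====

-- B replaces A's single interleaved loop by two separate passes (usage scan, then fatal join); same values everywhere.

-- ===== PORT A =====
-- loop over lines carrying the fatal_lines accumulator; 'all' keeps the original list for the tail logic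
def getErrLoopA (all : List String) : List String → String → String
  | [], fatal =>
      if fatal ≠ "" then fatal
      else match all.getLast? with
           | some l => l
           | none => ": Unknown error"
  | l :: rest, fatal =>
      if PySem.Str.isIn "usage: git" l then ": Wrong usage. " ++ l
      else if PySem.Str.isIn "fatal: " l then
        getErrLoopA all rest (fatal ++ (": " ++ PySem.Str.replace l "fatal: " ""))
      else getErrLoopA all rest fatal

def get_error_str (output : String) : String :=
  let lines := PySem.Str.splitlines output
  getErrLoopA lines lines ""

-- ===== PORT B =====
def get_error_str_alt (output : String) : String :=
  let lines := PySem.Str.splitlines output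
  match lines.find? (fun l => PySem.Str.isIn "usage: git" l) with
  | some l => ": Wrong usage. " ++ l
  | none =>
      let fatal := String.join ((lines.filter (fun l => PySem.Str.isIn "fatal: " l)).map
        (fun l => ": " ++ PySem.Str.replace l "fatal: " ""))
      if fatal ≠ "" then fatal
      else match lines.getLast? with
           | some l => l
           | none => ": Unknown error"

-- ===== PRECONDITION & SPEC =====
def Spec_get_error_str (output : String) (out : String) : Prop := out = get_error_str_alt output
instance (output : String) (out : String) : Decidable (Spec_get_error_str output out) := by unfold Spec_get_error_str; infer_instance

-- ===== CLAIM (what is proved, stated in full; the proofs are below) =====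
def Claim_equal_get_error_str : Prop := ∀ (output : String), Dom_get_error_str output → Spec_get_error_str output (get_error_str output)

-- ===== LEMMAS AND PROOFS =====

theorem foldl_append_str (xs : List String) (a : String) :
    xs.foldl (· ++ ·) a = a ++ xs.foldl (· ++ ·) "" := by
  induction xs generalizing a with
  | nil => simp
  | cons x xs ih =>
      rw [List.foldl_cons, List.foldl_cons, ih (a ++ x), ih ("" ++ x)]
      simp [String.append_assoc]

theorem join_cons (x : String) (xs : List String) :
    String.join (x :: xs) = x ++ String.join xs := by
  rw [String.join, String.join, List.foldl_cons, foldl_append_str xs ("" ++ x)]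
  simp

theorem getErrLoopA_eq (all lines : List String) (fatal : String) :
    getErrLoopA all lines fatal =
      match lines.find? (fun l => PySem.Str.isIn "usage: git" l) with
      | some l => ": Wrong usage. " ++ l
      | none =>
          let f := fatal ++ String.join ((lines.filter (fun l => PySem.Str.isIn "fatal: " l)).map
            (fun l => ": " ++ PySem.Str.replace l "fatal: " ""))
          if f ≠ "" then f
          else match all.getLast? with
               | some l => l
               | none => ": Unknown error" := by
  induction lines generalizing fatal with
  | nil => simp [getErrLoopA, String.join]
  | cons l rest ih =>
      by_cases hu : PySem.Str.isIn "usage: git" l <;>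
        by_cases hf : PySem.Str.isIn "fatal: " l <;>
        simp at hu hf <;>
        simp [getErrLoopA, List.find?, List.filter, ih, hu, hf, join_cons, String.append_assoc]

-- ===== VERDICT (by name: the statement is the Claim_ definition above) =====
theorem get_error_str_spec : Claim_equal_get_error_str := by
  intro output _
  unfold Spec_get_error_str get_error_str get_error_str_alt
  simp [getErrLoopA_eq]
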